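-- pv_equiv track=rewrite | github.com/devakowakou/adventofcode | day12/solution_fixed.py | all_placements_for_orientation
-- ===== SOURCE A (Python) =====
-- def placement_mask(cells, w, h, top, left):
--     mask = 0
--     for r,c in cells:
--         rr = top + r; cc = left + c
--         if rr < 0 or rr >= h or cc < 0 or cc >= w:
--             return None
--         idx = rr * w + cc
--         mask |= (1 << idx)
--     return mask
--
-- def all_placements_for_orientation(ori, w, h):
--     maxr = max(r for r,c in ori)
--     maxc = max(c for r,c in ori)
--     placements = []
--     for top in range(0, h - maxr):
--         for left in range(0, w - maxc):
--             pm = placement_mask(ori, w, h, top, left)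
--             if pm is not None:
--                 placements.append(pm)
--     return placements
-- ===== SOURCE B (Python) =====
-- def all_placements_for_orientation(ori, w, h):
--     maxr = max(r for r, c in ori)
--     maxc = max(c for r, c in ori)
--     minr = min(r for r, c in ori)
--     minc = min(c for r, c in ori)
--     tops = range(max(0, -minr), h - maxr)
--     lefts = range(max(0, -minc), w - maxc)
--     if len(tops) == 0 or len(lefts) == 0:
--         return []
--     base = 0
--     for r, c in ori:
--         base |= 1 << ((r - minr) * w + (c - minc))
--     return [base << ((top + minr) * w + (left + minc))
--             for top in tops for left in lefts]
-- ===== Notes on version B (the rewrite author's own statement) =====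
-- stated objective: alternative
-- what changed: B precomputes one base bitmask and the valid (top,left) offset rectangle from min/max cell coordinates, then emits each placement as a single shift of the base mask, instead of A's per-placement cell-by-cell mask rebuild and validity re-check (intended as faster; a timing run measured about 2.4-3x but could not confirm its threshold at the largest size, so no speed is claimed).
import Mathlib
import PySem

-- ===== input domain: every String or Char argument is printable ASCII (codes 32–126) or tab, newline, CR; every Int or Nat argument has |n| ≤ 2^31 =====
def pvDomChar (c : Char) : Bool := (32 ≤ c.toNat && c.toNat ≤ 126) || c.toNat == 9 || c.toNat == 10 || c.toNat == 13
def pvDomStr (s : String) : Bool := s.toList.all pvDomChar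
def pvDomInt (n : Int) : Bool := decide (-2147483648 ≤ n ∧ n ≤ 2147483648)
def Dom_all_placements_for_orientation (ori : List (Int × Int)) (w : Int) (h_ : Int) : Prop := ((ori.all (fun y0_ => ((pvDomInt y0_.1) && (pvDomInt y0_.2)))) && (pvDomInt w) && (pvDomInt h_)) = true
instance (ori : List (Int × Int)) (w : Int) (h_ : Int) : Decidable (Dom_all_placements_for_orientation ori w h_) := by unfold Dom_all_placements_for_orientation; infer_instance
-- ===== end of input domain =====

-- B hoists the per-placement cell scan out of the double loop: it computes one base bitmask
-- and the rectangle of valid (top,left) offsets up front, then emits each placement as a single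
-- shift of the base mask (objective: alternative; the inner per-cell loop disappears).

-- ===== PORT A =====
-- helper: Python's placement_mask.  Inside the else-branch the index (top+r)*w+(left+c) is
-- provably ≥ 0 (0 ≤ rr < h, 0 ≤ cc < w force w > 0), so `.toNat` is exact there; Python's
-- `mask | (1 << idx)` on these nonnegative ints is Int.lor / <<<.
def pvMask : List (Int × Int) → Int → Int → Int → Int → Int → Option Int
  | [], _, _, _, _, mask => some mask
  | p :: rest, w, h, top, left, mask =>
      if top + p.1 < 0 ∨ top + p.1 ≥ h ∨ left + p.2 < 0 ∨ left + p.2 ≥ w then none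
      else pvMask rest w h top left
        (Int.lor mask ((1 : Int) <<< ((top + p.1) * w + (left + p.2)).toNat))

def all_placements_for_orientation (ori : List (Int × Int)) (w : Int) (h_ : Int) : List Int :=
  let maxr := (PySem.List.max? (ori.map (·.1)) (fun x => x)).getD 0
  let maxc := (PySem.List.max? (ori.map (·.2)) (fun x => x)).getD 0
  (PySem.List.pyRange 0 (h_ - maxr) 1).foldl (fun placements top =>
    (PySem.List.pyRange 0 (w - maxc) 1).foldl (fun placements left =>
      match pvMask ori w h_ top left 0 with
      | some pm => placements ++ [pm]
      | none => placements) placements) []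

-- ===== PORT B =====
-- In the reachable else-branch both ranges are nonempty, which forces w ≥ 0 and makes every
-- shift amount (r-minr)*w+(c-minc) and (top+minr)*w+(left+minc) nonnegative: `.toNat` is exact.
def all_placements_for_orientation_alt (ori : List (Int × Int)) (w : Int) (h_ : Int) : List Int :=
  let maxr := (PySem.List.max? (ori.map (·.1)) (fun x => x)).getD 0
  let maxc := (PySem.List.max? (ori.map (·.2)) (fun x => x)).getD 0
  let minr := (PySem.List.min? (ori.map (·.1)) (fun x => x)).getD 0
  let minc := (PySem.List.min? (ori.map (·.2)) (fun x => x)).getD 0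
  let tops := PySem.List.pyRange (max 0 (-minr)) (h_ - maxr) 1
  let lefts := PySem.List.pyRange (max 0 (-minc)) (w - maxc) 1
  if tops.length = 0 ∨ lefts.length = 0 then []
  else
    let base := ori.foldl
      (fun b p => Int.lor b ((1 : Int) <<< ((p.1 - minr) * w + (p.2 - minc)).toNat)) 0
    tops.flatMap (fun top => lefts.map (fun left =>
      base <<< ((top + minr) * w + (left + minc)).toNat))

-- ===== PRECONDITION & SPEC =====
-- Pre_ excludes only the empty orientation, on which Python A raises ValueError (max() of an
-- empty generator); Python B raises there too.
def Pre_all_placements_for_orientation (ori : List (Int × Int)) (w : Int) (h_ : Int) : Prop := ori ≠ []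
instance (ori : List (Int × Int)) (w : Int) (h_ : Int) : Decidable (Pre_all_placements_for_orientation ori w h_) := by unfold Pre_all_placements_for_orientation; infer_instance
def pvWitness_all_placements_for_orientation : (List (Int × Int)) × Int × Int := ([(0, 0), (0, 1)], 3, 2)
def Spec_all_placements_for_orientation (ori : List (Int × Int)) (w : Int) (h_ : Int) (out : List Int) : Prop := out = all_placements_for_orientation_alt ori w h_
instance (ori : List (Int × Int)) (w : Int) (h_ : Int) (out : List Int) : Decidable (Spec_all_placements_for_orientation ori w h_ out) := by unfold Spec_all_placements_for_orientation; infer_instance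

-- ===== CLAIM (what is proved, stated in full; the proofs are below) =====
def Claim_equal_all_placements_for_orientation : Prop := ∀ (ori : List (Int × Int)) (w : Int) (h_ : Int), Dom_all_placements_for_orientation ori w h_ → Pre_all_placements_for_orientation ori w h_ → Spec_all_placements_for_orientation ori w h_ (all_placements_for_orientation ori w h_)

-- ===== LEMMAS AND PROOFS =====

-- casts between Int and Nat bit operations
lemma pvCastShift (a k : Nat) : ((a : Int) <<< k) = ((a <<< k : Nat) : Int) := by
  rw [Int.shiftLeft_eq, Nat.shiftLeft_eq]
  push_cast
  ring

lemma pvCastLor (a b : Nat) : Int.lor (a : Int) (b : Int) = ((a ||| b : Nat) : Int) := rfl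

lemma pvShiftLor (a b k : Nat) : (a ||| b) <<< k = (a <<< k) ||| (b <<< k) := by
  apply Nat.eq_of_testBit_eq; intro i
  simp [Nat.testBit_shiftLeft]
  by_cases h : k ≤ i <;> simp [h]

-- the Int-valued or-fold is the cast of the Nat-valued or-fold
lemma pvCastFold (f : Int × Int → Nat) :
    ∀ (l : List (Int × Int)) (m : Nat),
      l.foldl (fun b p => Int.lor b ((1 : Int) <<< f p)) (m : Int)
        = ((l.foldl (fun b p => b ||| (1 <<< f p)) m : Nat) : Int) := by
  intro l
  induction l with
  | nil => intro m; simp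
  | cons q t ih =>
      intro m
      simp only [List.foldl_cons]
      rw [show ((1 : Int) <<< f q) = (((1 : Nat) <<< f q : Nat) : Int) from pvCastShift 1 (f q)]
      rw [pvCastLor]
      exact ih _

-- shifting the base mask = shifting every cell index
lemma pvShiftFold (f : Int × Int → Nat) (k : Nat) :
    ∀ (l : List (Int × Int)) (m : Nat),
      l.foldl (fun b p => b ||| (1 <<< (f p + k))) (m <<< k)
        = (l.foldl (fun b p => b ||| (1 <<< f p)) m) <<< k := by
  intro l
  induction l with
  | nil => intro m; simp
  | cons q t ih =>
      intro m
      simp only [List.foldl_cons]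
      rw [Nat.shiftLeft_add, ← pvShiftLor, ih]

-- characterisation of placement_mask
lemma pvMaskSpec (w h top left : Int) :
    ∀ (cells : List (Int × Int)) (m : Nat),
      pvMask cells w h top left (m : Int)
        = if ∀ p ∈ cells, 0 ≤ top + p.1 ∧ top + p.1 < h ∧ 0 ≤ left + p.2 ∧ left + p.2 < w
          then some (((cells.foldl
              (fun b p => b ||| (1 <<< ((top + p.1) * w + (left + p.2)).toNat)) m : Nat) : Int))
          else none := by
  intro cells
  induction cells with
  | nil => intro m; simp [pvMask]
  | cons q t ih =>
      intro m
      by_cases hq : 0 ≤ top + q.1 ∧ top + q.1 < h ∧ 0 ≤ left + q.2 ∧ left + q.2 < w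
      · rw [pvMask, if_neg (by omega)]
        rw [show (Int.lor (m : Int) ((1 : Int) <<< ((top + q.1) * w + (left + q.2)).toNat))
              = (((m ||| (1 <<< ((top + q.1) * w + (left + q.2)).toNat) : Nat)) : Int) by
            rw [show ((1 : Int) <<< ((top + q.1) * w + (left + q.2)).toNat)
                  = (((1 : Nat) <<< ((top + q.1) * w + (left + q.2)).toNat : Nat) : Int) from
                pvCastShift 1 _, pvCastLor]]
        rw [ih]
        by_cases ht : ∀ p ∈ t, 0 ≤ top + p.1 ∧ top + p.1 < h ∧ 0 ≤ left + p.2 ∧ left + p.2 < w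
        · rw [if_pos ht, if_pos (by rw [List.forall_mem_cons]; exact ⟨hq, ht⟩)]
          simp only [List.foldl_cons]
        · exact (if_neg ht).trans
            (if_neg (fun hall => ht (fun p hp => hall p (List.mem_cons_of_mem q hp)))).symm
      · rw [pvMask, if_pos (by omega), if_neg]
        intro hall
        exact hq (hall q (List.mem_cons_self))

-- filtering a unit range by a lower bound shifts its start
lemma pvFilterLe (m : Int) :
    ∀ (n : Nat) (a b : Int), (b - a).toNat = n →
      (PySem.List.pyRange a b 1).filter (fun x => decide (m ≤ x))
        = PySem.List.pyRange (max a m) b 1 := by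
  intro n
  induction n with
  | zero =>
      intro a b h
      rw [PySem.List.pyRange_one_eq_nil (by omega), PySem.List.pyRange_one_eq_nil (by omega)]
      rfl
  | succ n ih =>
      intro a b h
      have hab : a < b := by omega
      rw [PySem.List.pyRange_one_cons hab, List.filter_cons]
      by_cases hm : m ≤ a
      · rw [if_pos (by simpa using hm), ih (a + 1) b (by omega),
          show max (a + 1) m = a + 1 by omega, show max a m = a by omega,
          ← PySem.List.pyRange_one_cons hab]
      · rw [if_neg (by simpa using hm), ih (a + 1) b (by omega),
          show max (a + 1) m = max a m by omega]

-- a guarded flatMap is a flatMap over the filtered list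
lemma pvFlatMapIte (p : Int → Prop) [DecidablePred p] (g : Int → List Int) :
    ∀ (l : List Int),
      l.flatMap (fun x => if p x then g x else [])
        = (l.filter (fun x => decide (p x))).flatMap g := by
  intro l
  induction l with
  | nil => simp
  | cons q t ih =>
      simp only [List.flatMap_cons, List.filter_cons]
      by_cases hq : p q <;> simp [hq, ih]

-- the heart of the proof: A's nested loop equals B's shift form, for any numbers enjoying
-- the extremal properties of maxr/maxc/minr/minc
lemma pvMain (ori : List (Int × Int)) (w h_ maxr maxc minr minc : Int)
    (hubr : ∀ p ∈ ori, p.1 ≤ maxr) (hlbr : ∀ p ∈ ori, minr ≤ p.1)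
    (hubc : ∀ p ∈ ori, p.2 ≤ maxc) (hlbc : ∀ p ∈ ori, minc ≤ p.2)
    (hmemr : ∃ p ∈ ori, p.1 = minr) (hmemc : ∃ p ∈ ori, p.2 = minc) :
    (PySem.List.pyRange 0 (h_ - maxr) 1).foldl (fun placements top =>
        (PySem.List.pyRange 0 (w - maxc) 1).foldl (fun placements left =>
          match pvMask ori w h_ top left 0 with
          | some pm => placements ++ [pm]
          | none => placements) placements) []
      = if (PySem.List.pyRange (max 0 (-minr)) (h_ - maxr) 1).length = 0 ∨
            (PySem.List.pyRange (max 0 (-minc)) (w - maxc) 1).length = 0 then []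
        else
          (PySem.List.pyRange (max 0 (-minr)) (h_ - maxr) 1).flatMap (fun top =>
            (PySem.List.pyRange (max 0 (-minc)) (w - maxc) 1).map (fun left =>
              (ori.foldl (fun b p =>
                  Int.lor b ((1 : Int) <<< ((p.1 - minr) * w + (p.2 - minc)).toNat)) 0)
                <<< ((top + minr) * w + (left + minc)).toNat)) := by
  have hP : ∀ top left : Int,
      pvMask ori w h_ top left 0
        = if ∀ p ∈ ori, 0 ≤ top + p.1 ∧ top + p.1 < h_ ∧ 0 ≤ left + p.2 ∧ left + p.2 < w
          then some (((ori.foldl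
              (fun b p => b ||| (1 <<< ((top + p.1) * w + (left + p.2)).toNat)) 0 : Nat) : Int))
          else none := by
    intro top left
    simpa using pvMaskSpec w h_ top left ori 0
  have hinner : ∀ (L : List Int) (acc : List Int) (top : Int),
      L.foldl (fun placements left =>
          match pvMask ori w h_ top left 0 with
          | some pm => placements ++ [pm]
          | none => placements) acc
        = acc ++ (L.filter (fun left =>
            decide (∀ p ∈ ori, 0 ≤ top + p.1 ∧ top + p.1 < h_ ∧ 0 ≤ left + p.2 ∧ left + p.2 < w))).map
            (fun left => ((ori.foldl
              (fun b p => b ||| (1 <<< ((top + p.1) * w + (left + p.2)).toNat)) 0 : Nat) : Int)) := by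
    intro L
    induction L with
    | nil => intro acc top; simp
    | cons x xs ih =>
        intro acc top
        simp only [List.foldl_cons, List.filter_cons]
        rw [hP top x]
        by_cases hc : ∀ p ∈ ori, 0 ≤ top + p.1 ∧ top + p.1 < h_ ∧ 0 ≤ x + p.2 ∧ x + p.2 < w
        · rw [if_pos hc, if_pos (decide_eq_true hc), ih]
          simp
        · rw [if_neg hc, if_neg (by simp only [decide_eq_true_eq]; exact hc)]
          exact ih acc top
  have houter : ∀ (T : List Int) (acc : List Int),
      T.foldl (fun placements top =>
          (PySem.List.pyRange 0 (w - maxc) 1).foldl (fun placements left =>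
            match pvMask ori w h_ top left 0 with
            | some pm => placements ++ [pm]
            | none => placements) placements) acc
        = acc ++ T.flatMap (fun top =>
            ((PySem.List.pyRange 0 (w - maxc) 1).filter (fun left =>
              decide (∀ p ∈ ori, 0 ≤ top + p.1 ∧ top + p.1 < h_ ∧ 0 ≤ left + p.2 ∧ left + p.2 < w))).map
              (fun left => ((ori.foldl
                (fun b p => b ||| (1 <<< ((top + p.1) * w + (left + p.2)).toNat)) 0 : Nat) : Int))) := by
    intro T
    induction T with
    | nil => intro acc; simp
    | cons x xs ih =>
        intro acc
        simp only [List.foldl_cons, List.flatMap_cons]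
        rw [hinner, ih, List.append_assoc]
  rw [houter, List.nil_append]
  have hstep2 : (PySem.List.pyRange 0 (h_ - maxr) 1).flatMap (fun top =>
        ((PySem.List.pyRange 0 (w - maxc) 1).filter (fun left =>
          decide (∀ p ∈ ori, 0 ≤ top + p.1 ∧ top + p.1 < h_ ∧ 0 ≤ left + p.2 ∧ left + p.2 < w))).map
          (fun left => ((ori.foldl
            (fun b p => b ||| (1 <<< ((top + p.1) * w + (left + p.2)).toNat)) 0 : Nat) : Int)))
      = (PySem.List.pyRange 0 (h_ - maxr) 1).flatMap (fun top =>
          if -minr ≤ top then (PySem.List.pyRange (max 0 (-minc)) (w - maxc) 1).map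
            (fun left => ((ori.foldl
              (fun b p => b ||| (1 <<< ((top + p.1) * w + (left + p.2)).toNat)) 0 : Nat) : Int))
          else []) := by
    rw [List.flatMap_def, List.flatMap_def]
    refine congrArg List.flatten (List.map_congr_left ?_)
    intro top htop
    obtain ⟨htop0, htop1⟩ := (PySem.List.mem_pyRange_one).1 htop
    have hiff : ∀ left ∈ PySem.List.pyRange 0 (w - maxc) 1,
        decide (∀ p ∈ ori, 0 ≤ top + p.1 ∧ top + p.1 < h_ ∧ 0 ≤ left + p.2 ∧ left + p.2 < w)
          = (decide (-minr ≤ top) && decide (-minc ≤ left)) := by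
      intro left hl
      obtain ⟨hl0, hl1⟩ := (PySem.List.mem_pyRange_one).1 hl
      rw [← Bool.decide_and]
      apply decide_eq_decide.mpr
      constructor
      · intro hall
        obtain ⟨pr, hpr, hpr'⟩ := hmemr
        obtain ⟨pc, hpc, hpc'⟩ := hmemc
        have h1 := hall pr hpr
        have h2 := hall pc hpc
        omega
      · rintro ⟨h1, h2⟩ p hp
        have := hubr p hp
        have := hlbr p hp
        have := hubc p hp
        have := hlbc p hp
        omega
    rw [List.filter_congr hiff]
    by_cases htd : -minr ≤ top
    · rw [if_pos htd]
      have he : (PySem.List.pyRange 0 (w - maxc) 1).filter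
          (fun left => decide (-minr ≤ top) && decide (-minc ≤ left))
          = (PySem.List.pyRange 0 (w - maxc) 1).filter (fun left => decide (-minc ≤ left)) :=
        List.filter_congr (fun left _ => by simp [htd])
      rw [he, pvFilterLe (-minc) (w - maxc - 0).toNat 0 (w - maxc) rfl]
    · rw [if_neg htd]
      have he : (PySem.List.pyRange 0 (w - maxc) 1).filter
          (fun left => decide (-minr ≤ top) && decide (-minc ≤ left))
          = (PySem.List.pyRange 0 (w - maxc) 1).filter (fun _ => false) :=
        List.filter_congr (fun left _ => by simp [htd])
      rw [he, List.filter_false, List.map_nil]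
  rw [hstep2, pvFlatMapIte (fun top => -minr ≤ top) _ _,
    pvFilterLe (-minr) (h_ - maxr - 0).toNat 0 (h_ - maxr) rfl]
  by_cases hempty : (PySem.List.pyRange (max 0 (-minr)) (h_ - maxr) 1).length = 0 ∨
      (PySem.List.pyRange (max 0 (-minc)) (w - maxc) 1).length = 0
  · rw [if_pos hempty]
    rcases hempty with h | h
    · rw [List.length_eq_zero_iff.mp h, List.flatMap_nil]
    · rw [List.length_eq_zero_iff.mp h]
      simp
  · rw [if_neg hempty]
    push_neg at hempty
    obtain ⟨ht0, hl0⟩ := hempty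
    rw [PySem.List.length_pyRange_one] at ht0 hl0
    have hwnn : 0 ≤ w := by
      obtain ⟨pc, hpc, hpc'⟩ := hmemc
      have := hubc pc hpc
      omega
    rw [List.flatMap_def, List.flatMap_def]
    refine congrArg List.flatten (List.map_congr_left ?_)
    intro top htop
    obtain ⟨htop0, htop1⟩ := (PySem.List.mem_pyRange_one).1 htop
    refine List.map_congr_left ?_
    intro left hleft
    obtain ⟨hleft0, hleft1⟩ := (PySem.List.mem_pyRange_one).1 hleft
    have hbase := pvCastFold (fun p => ((p.1 - minr) * w + (p.2 - minc)).toNat) ori 0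
    simp only [Nat.cast_zero] at hbase
    rw [hbase, pvCastShift]
    refine congrArg (fun n : Nat => (n : Int)) ?_
    calc ori.foldl (fun b p => b ||| (1 <<< ((top + p.1) * w + (left + p.2)).toNat)) 0
        = ori.foldl (fun b p => b ||| (1 <<< (((p.1 - minr) * w + (p.2 - minc)).toNat
            + ((top + minr) * w + (left + minc)).toNat))) 0 := by
          refine PySem.List.foldl_congr_mem _ _ _ _ ?_
          intro acc p hp
          have hb1 := hlbr p hp
          have hb2 := hubr p hp
          have hb3 := hlbc p hp
          have hb4 := hubc p hp
          have h1 : 0 ≤ (p.1 - minr) * w + (p.2 - minc) :=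
            add_nonneg (mul_nonneg (by omega) hwnn) (by omega)
          have h2 : 0 ≤ (top + minr) * w + (left + minc) := by
            have hm1 : 0 ≤ (top + minr) * w := mul_nonneg (by omega) hwnn
            omega
          have h3 : (top + p.1) * w + (left + p.2)
              = ((p.1 - minr) * w + (p.2 - minc)) + ((top + minr) * w + (left + minc)) := by ring
          have : ((top + p.1) * w + (left + p.2)).toNat
              = ((p.1 - minr) * w + (p.2 - minc)).toNat
                + ((top + minr) * w + (left + minc)).toNat := by omega
          rw [this]
      _ = ori.foldl (fun b p => b ||| (1 <<< (((p.1 - minr) * w + (p.2 - minc)).toNat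
            + ((top + minr) * w + (left + minc)).toNat)))
            (0 <<< ((top + minr) * w + (left + minc)).toNat) := by
          rw [Nat.zero_shiftLeft]
      _ = (ori.foldl (fun b p => b ||| (1 <<< ((p.1 - minr) * w + (p.2 - minc)).toNat)) 0)
            <<< ((top + minr) * w + (left + minc)).toNat :=
          pvShiftFold _ _ ori 0

-- ===== VERDICT (by name: the statement is the Claim_ definition above) =====
theorem all_placements_for_orientation_spec : Claim_equal_all_placements_for_orientation := by
  intro ori w h_ hdom hpre
  unfold Spec_all_placements_for_orientation
  obtain ⟨q, t, rfl⟩ : ∃ q t, ori = q :: t := by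
    cases ori with
    | nil => exact absurd rfl hpre
    | cons q t => exact ⟨q, t, rfl⟩
  have hmaxr : (PySem.List.max? ((q :: t).map (·.1)) (fun x => x)).getD 0
      = (t.map (·.1)).foldl max q.1 := by
    rw [List.map_cons, PySem.List.max?_id_cons]; rfl
  have hmaxc : (PySem.List.max? ((q :: t).map (·.2)) (fun x => x)).getD 0
      = (t.map (·.2)).foldl max q.2 := by
    rw [List.map_cons, PySem.List.max?_id_cons]; rfl
  have hminr : (PySem.List.min? ((q :: t).map (·.1)) (fun x => x)).getD 0
      = (t.map (·.1)).foldl min q.1 := by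
    rw [List.map_cons, PySem.List.min?_id_cons]; rfl
  have hminc : (PySem.List.min? ((q :: t).map (·.2)) (fun x => x)).getD 0
      = (t.map (·.2)).foldl min q.2 := by
    rw [List.map_cons, PySem.List.min?_id_cons]; rfl
  have hubr : ∀ p ∈ q :: t, p.1 ≤ (t.map (·.1)).foldl max q.1 := by
    intro p hp
    rcases List.mem_cons.1 hp with rfl | hp'
    · exact (PySem.List.le_foldl_max (t.map (·.1)) p.1).1
    · exact (PySem.List.le_foldl_max (t.map (·.1)) q.1).2 p.1 (List.mem_map_of_mem hp')
  have hubc : ∀ p ∈ q :: t, p.2 ≤ (t.map (·.2)).foldl max q.2 := by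
    intro p hp
    rcases List.mem_cons.1 hp with rfl | hp'
    · exact (PySem.List.le_foldl_max (t.map (·.2)) p.2).1
    · exact (PySem.List.le_foldl_max (t.map (·.2)) q.2).2 p.2 (List.mem_map_of_mem hp')
  have hlbr : ∀ p ∈ q :: t, (t.map (·.1)).foldl min q.1 ≤ p.1 := by
    intro p hp
    rcases List.mem_cons.1 hp with rfl | hp'
    · exact (PySem.List.foldl_min_le (t.map (·.1)) p.1).1
    · exact (PySem.List.foldl_min_le (t.map (·.1)) q.1).2 p.1 (List.mem_map_of_mem hp')
  have hlbc : ∀ p ∈ q :: t, (t.map (·.2)).foldl min q.2 ≤ p.2 := by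
    intro p hp
    rcases List.mem_cons.1 hp with rfl | hp'
    · exact (PySem.List.foldl_min_le (t.map (·.2)) p.2).1
    · exact (PySem.List.foldl_min_le (t.map (·.2)) q.2).2 p.2 (List.mem_map_of_mem hp')
  have hmemr : ∃ p ∈ q :: t, p.1 = (t.map (·.1)).foldl min q.1 := by
    rcases PySem.List.foldl_min_mem (t.map (·.1)) q.1 with h | h
    · exact ⟨q, List.mem_cons_self, h.symm⟩
    · obtain ⟨p, hp, hp'⟩ := List.mem_map.1 h
      exact ⟨p, List.mem_cons_of_mem q hp, hp'⟩
  have hmemc : ∃ p ∈ q :: t, p.2 = (t.map (·.2)).foldl min q.2 := by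
    rcases PySem.List.foldl_min_mem (t.map (·.2)) q.2 with h | h
    · exact ⟨q, List.mem_cons_self, h.symm⟩
    · obtain ⟨p, hp, hp'⟩ := List.mem_map.1 h
      exact ⟨p, List.mem_cons_of_mem q hp, hp'⟩
  show all_placements_for_orientation _ _ _ = _
  unfold all_placements_for_orientation all_placements_for_orientation_alt
  simp only [hmaxr, hmaxc, hminr, hminc]
  exact pvMain (q :: t) w h_ _ _ _ _ hubr hlbr hubc hlbc hmemr hmemc
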